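-- pv_equiv track=rewrite | github.com/essential2189/codetree-TILs | 240422/아름다운 수/beautiful-number.py | check
-- ===== SOURCE A (Python) =====
-- def check(string):
--     one = []
--     two = []
--     three = []
--     four = []
--     temp = string[0]
--     for s in string[1:]:
--         if s == temp[-1]:
--             temp += s
--         else:
--             if temp[0] == "1":
--                 one.append(temp)
--             elif temp[0] == "2":
--                 two.append(temp)
--             elif temp[0] == "3":
--                 three.append(temp)
--             elif temp[0] == "4":
--                 four.append(temp)
--
--             temp = s
--
--     if temp[0] == "1":
--         one.append(temp)
--     elif temp[0] == "2":
--         two.append(temp)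
--     elif temp[0] == "3":
--         three.append(temp)
--     elif temp[0] == "4":
--         four.append(temp)
--
--     if len(two):
--         for t in two:
--             if len(t) % 2 != 0:
--                 return False
--
--     if len(three):
--         for t in three:
--             if len(t) % 3 != 0:
--                 return False
--
--     if len(four):
--         for f in four:
--             if len(f) % 4 != 0:
--                 return False
--
--     return True
-- ===== SOURCE B (Python) =====
-- def check(string):
--     n = len(string)
--     edges = [0] + [i for i in range(1, n) if string[i] != string[i - 1]] + [n]
--     return all((b - a) % int(string[a]) == 0
--                for a, b in zip(edges, edges[1:])
--                if string[a] in "234")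
-- ===== Notes on version B (the rewrite author's own statement) =====
-- stated objective: alternative
-- what changed: B never accumulates runs or buckets: it first builds the list of boundary positions where adjacent characters differ, then checks divisibility of the gaps between consecutive boundaries in one declarative all() over zipped pairs.
import Mathlib
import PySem

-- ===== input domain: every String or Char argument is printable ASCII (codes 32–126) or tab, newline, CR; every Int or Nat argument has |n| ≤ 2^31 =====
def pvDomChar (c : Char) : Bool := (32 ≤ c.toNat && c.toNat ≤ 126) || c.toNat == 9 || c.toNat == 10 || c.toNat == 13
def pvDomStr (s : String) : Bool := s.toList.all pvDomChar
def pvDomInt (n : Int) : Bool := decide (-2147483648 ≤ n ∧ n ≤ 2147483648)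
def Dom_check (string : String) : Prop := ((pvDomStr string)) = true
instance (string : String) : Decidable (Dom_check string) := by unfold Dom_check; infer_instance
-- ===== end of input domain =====

-- B replaces A's run accumulation into four digit buckets (and the three verify loops) by a
-- boundary-position list: boundaries where adjacent characters differ, then one all() over the
-- gaps between consecutive boundaries (objective: alternative decomposition).

-- ===== PORT A =====
-- buckets (one, two, three, four)
abbrev Bk := List (List Char) × List (List Char) × List (List Char) × List (List Char)

-- the duplicated "if temp[0] == '1' … elif … elif …" block that appends temp to a bucket
def flushA (bk : Bk) (temp : List Char) : Bk :=
  if PySem.List.pyGet? temp 0 = some '1' then (bk.1 ++ [temp], bk.2.1, bk.2.2.1, bk.2.2.2)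
  else if PySem.List.pyGet? temp 0 = some '2' then (bk.1, bk.2.1 ++ [temp], bk.2.2.1, bk.2.2.2)
  else if PySem.List.pyGet? temp 0 = some '3' then (bk.1, bk.2.1, bk.2.2.1 ++ [temp], bk.2.2.2)
  else if PySem.List.pyGet? temp 0 = some '4' then (bk.1, bk.2.1, bk.2.2.1, bk.2.2.2 ++ [temp])
  else bk

-- one iteration of "for s in string[1:]"
def stepA (st : Bk × List Char) (s : Char) : Bk × List Char :=
  if PySem.List.pyGet? st.2 (-1) = some s then (st.1, st.2 ++ [s])
  else (flushA st.1 st.2, [s])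

-- the three verify loops ("if len(two): for t in two: …" — each returns False on a bad run)
def verdictA (bk : Bk) : Bool :=
  if bk.2.1.any (fun t => t.length % 2 != 0) then false
  else if bk.2.2.1.any (fun t => t.length % 3 != 0) then false
  else if bk.2.2.2.any (fun t => t.length % 4 != 0) then false
  else true

def check (string : String) : Bool :=
  match PySem.Str.pyGet? string 0 with
  | none => false   -- string[0] raises IndexError on ""; excluded by Pre_check
  | some c =>
    let st := (PySem.List.slice string.toList (some 1) none).foldl stepA (([],[],[],[]), [c])
    verdictA (flushA st.1 st.2)

-- ===== PORT B =====
-- the body of B's generator: the filter "if string[a] in '234'" and the test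
-- "(b - a) % int(string[a]) == 0" (string[a] via pyGet?: none = IndexError, reachable
-- only on the empty string, which is outside Pre_check)
def pairOK (l : List Char) (ab : Int × Int) : Bool :=
  match PySem.List.pyGet? l ab.1 with
  | some c =>
    if c = '2' || c = '3' || c = '4' then (ab.2 - ab.1) % ((c.toNat : Int) - 48) == 0
    else true
  | none => true

def check_alt (string : String) : Bool :=
  let l := string.toList
  let n : Int := l.length
  let edges := (0 : Int) ::
    ((PySem.List.pyRange 1 n 1).filter
      (fun i => PySem.List.pyGet? l i != PySem.List.pyGet? l (i - 1))) ++ [n]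
  (edges.zip edges.tail).all (pairOK l)

-- ===== PRECONDITION & SPEC =====
-- Pre_ excludes only the empty string, on which both A (at string[0]) and B (at string[a]
-- inside the generator, reached because edges = [0, 0]) raise IndexError.
def Pre_check (string : String) : Prop := string.toList ≠ []
instance (string : String) : Decidable (Pre_check string) := by unfold Pre_check; infer_instance
def pvWitness_check : String := "2233"

def Spec_check (string : String) (out : Bool) : Prop := out = check_alt string
instance (string : String) (out : Bool) : Decidable (Spec_check string out) := by unfold Spec_check; infer_instance

-- ===== CLAIM (what is proved, stated in full; the proofs are below) =====
def Claim_equal_check : Prop := ∀ (string : String), Dom_check string → Pre_check string → Spec_check string (check string)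

-- ===== LEMMAS AND PROOFS =====

-- a run is good when its length is divisible by its digit (digits 2,3,4 only)
def good (r : List Char) : Bool :=
  if r.head? = some '2' then r.length % 2 == 0
  else if r.head? = some '3' then r.length % 3 == 0
  else if r.head? = some '4' then r.length % 4 == 0
  else true

-- maximal runs of equal characters
def runs : List Char → List (List Char)
  | [] => []
  | c :: rest => (c :: rest.takeWhile (fun x => x == c)) :: runs (rest.dropWhile (fun x => x == c))
termination_by l => l.length
decreasing_by
  simpa using Nat.lt_succ_of_le (List.length_dropWhile_le _ _)

theorem verdictA_eq (bk : Bk) :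
    verdictA bk = (bk.2.1.all (fun t => t.length % 2 == 0) &&
                   bk.2.2.1.all (fun t => t.length % 3 == 0) &&
                   bk.2.2.2.all (fun t => t.length % 4 == 0)) := by
  unfold verdictA
  cases h2 : bk.2.1.any (fun t => t.length % 2 != 0) <;>
  cases h3 : bk.2.2.1.any (fun t => t.length % 3 != 0) <;>
  cases h4 : bk.2.2.2.any (fun t => t.length % 4 != 0) <;>
  simp_all [List.all_eq_not_any_not]

theorem verdictA_flush (bk : Bk) (temp : List Char) :
    verdictA (flushA bk temp) = (verdictA bk && good temp) := by
  unfold flushA good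
  cases temp with
  | nil => simp [PySem.List.pyGet?_zero]
  | cons c ts =>
    simp only [PySem.List.pyGet?_zero_cons, List.head?_cons, Option.some.injEq]
    split_ifs <;>
      simp_all [verdictA_eq, List.all_append] <;>
      cases h2 : List.all _ _ <;> cases h3 : List.all _ _ <;>
        simp_all [Bool.and_comm]

def Uni (c : Char) (temp : List Char) : Prop := temp ≠ [] ∧ ∀ x ∈ temp, x = c

theorem takeWhile_all {c : Char} {ts : List Char} (h : ∀ x ∈ ts, x = c) :
    ∀ tail, ((ts ++ tail).takeWhile (fun x => x == c) = ts ++ tail.takeWhile (fun x => x == c)) ∧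
            ((ts ++ tail).dropWhile (fun x => x == c) = tail.dropWhile (fun x => x == c)) := by
  induction ts with
  | nil => simp
  | cons t ts ih =>
    intro tail
    have ht : t = c := h t (by simp)
    have ih' := ih (fun x hx => h x (by simp [hx])) tail
    simp [ht, ih'.1, ih'.2]

theorem runs_uniform {c : Char} {temp : List Char} (hU : Uni c temp) :
    ∀ tail, (∀ s ∈ tail.head?, s ≠ c) → runs (temp ++ tail) = temp :: runs tail := by
  obtain ⟨hne, hall⟩ := hU
  cases temp with
  | nil => exact absurd rfl hne
  | cons d ts =>
    intro tail htail
    have hd : d = c := hall d (by simp)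
    have hts : ∀ x ∈ ts, x = c := fun x hx => hall x (by simp [hx])
    have htk := takeWhile_all hts tail
    rw [List.cons_append, runs, hd, htk.1, htk.2]
    cases tail with
    | nil => simp
    | cons s rest =>
      have hs : (s == c) = false := by simpa using htail s (by simp)
      simp [hs]

-- ===== B-side characterisation =====

def natBounds (l : List Char) : List Nat :=
  (List.range (l.length - 1)).filter (fun k => l[k + 1]? != l[k]?)

def edgesOf (l : List Char) : List Int :=
  0 :: (natBounds l).map (fun (k : Nat) => 1 + (k : Int)) ++ [(l.length : Int)]

def pairsAll (l : List Char) : Bool := ((edgesOf l).zip (edgesOf l).tail).all (pairOK l)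

theorem check_alt_eq_pairsAll (s : String) : check_alt s = pairsAll s.toList := by
  have hfil : (PySem.List.pyRange 1 (s.toList.length : Int) 1).filter
      (fun i => PySem.List.pyGet? s.toList i != PySem.List.pyGet? s.toList (i - 1)) =
      (natBounds s.toList).map (fun (k : Nat) => 1 + (k : Int)) := by
    rw [PySem.List.pyRange_one,
      show ((s.toList.length : Int) - 1).toNat = s.toList.length - 1 by omega,
      List.filter_map]
    unfold natBounds
    congr 1
    apply List.filter_congr
    intro k _
    have h1 : (1 : Int) + (k : Int) = ((k + 1 : Nat) : Int) := by push_cast; ring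
    have h2 : ((k + 1 : Nat) : Int) - 1 = ((k : Nat) : Int) := by push_cast; ring
    simp only [Function.comp_apply, h1, h2, PySem.List.pyGet?_natCast]
  have hrfl : check_alt s =
      (((0 : Int) :: ((PySem.List.pyRange 1 (s.toList.length : Int) 1).filter
          (fun i => PySem.List.pyGet? s.toList i != PySem.List.pyGet? s.toList (i - 1)))
        ++ [(s.toList.length : Int)]).zip
       (((0 : Int) :: ((PySem.List.pyRange 1 (s.toList.length : Int) 1).filter
          (fun i => PySem.List.pyGet? s.toList i != PySem.List.pyGet? s.toList (i - 1)))
        ++ [(s.toList.length : Int)]).tail)).all (pairOK s.toList) := rfl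
  rw [hrfl, hfil]
  rfl

theorem uniform_getElem? {c : Char} {r : List Char} (hU : Uni c r) :
    ∀ j, j < r.length → r[j]? = some c := by
  intro j hj
  rw [List.getElem?_eq_getElem hj]
  exact congrArg some (hU.2 _ (List.getElem_mem hj))

theorem natBounds_uniform {c : Char} {r : List Char} (hU : Uni c r) :
    ∀ m, m ≤ r.length - 1 → (List.range m).filter (fun k => r[k + 1]? != r[k]?) = [] := by
  intro m hm
  apply List.filter_eq_nil_iff.mpr
  intro k hk
  have hk' : k < m := List.mem_range.mp hk
  have hrlen : 1 ≤ r.length := by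
    cases r with
    | nil => exact absurd rfl hU.1
    | cons a t => simp
  have h1 : r[k + 1]? = some c := uniform_getElem? hU _ (by omega)
  have h2 : r[k]? = some c := uniform_getElem? hU _ (by omega)
  simp [h1, h2]

theorem natBounds_run {c : Char} {r d : List Char} (hU : Uni c r)
    (hd : ∀ x ∈ d.head?, x ≠ c) :
    natBounds (r ++ d) =
      if d = [] then []
      else (r.length - 1) :: (natBounds d).map (fun j => j + r.length) := by
  have hk : 1 ≤ r.length := by
    cases r with
    | nil => exact absurd rfl hU.1
    | cons a t => simp
  cases d with
  | nil =>
    rw [List.append_nil, if_pos rfl]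
    unfold natBounds
    exact natBounds_uniform hU _ le_rfl
  | cons x d' =>
    have hx : x ≠ c := hd x rfl
    rw [if_neg (by simp : ¬ (x :: d' : List Char) = [])]
    unfold natBounds
    have hlen : (r ++ x :: d').length - 1 = r.length + ((x :: d').length - 1) := by
      simp
    rw [hlen, List.range_add]
    rw [List.filter_append, List.filter_map]
    have hsplit : List.range r.length = List.range (r.length - 1) ++ [r.length - 1] := by
      have h : r.length = (r.length - 1) + 1 := by omega
      conv_lhs => rw [h]
      rw [List.range_succ]
    have hpre : (List.range (r.length - 1)).filter
        (fun k => (r ++ x :: d')[k + 1]? != (r ++ x :: d')[k]?) = [] := by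
      apply List.filter_eq_nil_iff.mpr
      intro k hk'
      have hkm : k < r.length - 1 := List.mem_range.mp hk'
      have h1 : (r ++ x :: d')[k + 1]? = some c := by
        rw [List.getElem?_append_left (by omega)]
        exact uniform_getElem? hU _ (by omega)
      have h2 : (r ++ x :: d')[k]? = some c := by
        rw [List.getElem?_append_left (by omega)]
        exact uniform_getElem? hU _ (by omega)
      simp [h1, h2]
    have hbound : (r ++ x :: d')[r.length - 1 + 1]? ≠ (r ++ x :: d')[r.length - 1]? := by
      have e1 : (r ++ x :: d')[r.length - 1 + 1]? = some x := by
        have h : r.length - 1 + 1 = r.length := by omega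
        rw [h, List.getElem?_append_right le_rfl]
        simp
      have e2 : (r ++ x :: d')[r.length - 1]? = some c := by
        rw [List.getElem?_append_left (by omega)]
        exact uniform_getElem? hU _ (by omega)
      rw [e1, e2]
      simp [hx]
    have hshift : ∀ i : Nat,
        ((r ++ x :: d')[r.length + i + 1]? != (r ++ x :: d')[r.length + i]?) =
        ((x :: d')[i + 1]? != (x :: d')[i]?) := by
      intro i
      have e1 : (r ++ x :: d')[r.length + i + 1]? = (x :: d')[i + 1]? := by
        rw [List.getElem?_append_right (by omega)]
        congr 1; omega
      have e2 : (r ++ x :: d')[r.length + i]? = (x :: d')[i]? := by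
        rw [List.getElem?_append_right (by omega)]
        congr 1; omega
      rw [e1, e2]
    rw [hsplit, List.filter_append, hpre]
    have hone : List.filter (fun k => (r ++ x :: d')[k + 1]? != (r ++ x :: d')[k]?)
        [r.length - 1] = [r.length - 1] := by
      simp only [List.filter_cons, List.filter_nil]
      rw [if_pos (by simpa using hbound)]
    rw [hone]
    have hmap : List.filter ((fun k => (r ++ x :: d')[k + 1]? != (r ++ x :: d')[k]?) ∘
          (fun x_1 => r.length + x_1)) (List.range ((x :: d').length - 1)) =
        List.filter (fun k => (x :: d')[k + 1]? != (x :: d')[k]?)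
          (List.range ((x :: d').length - 1)) := by
      apply List.filter_congr
      intro i _
      simpa [Function.comp, Nat.add_assoc] using hshift i
    rw [hmap]
    simp [Nat.add_comm]

theorem edgesOf_run {c : Char} {r d : List Char} (hU : Uni c r)
    (hd : ∀ x ∈ d.head?, x ≠ c) (hne : d ≠ []) :
    edgesOf (r ++ d) = 0 :: (edgesOf d).map (fun a => a + (r.length : Int)) := by
  have hk : 1 ≤ r.length := by
    cases r with
    | nil => exact absurd rfl hU.1
    | cons a t => simp
  unfold edgesOf
  rw [natBounds_run hU hd, if_neg hne]
  simp only [List.map_cons, List.map_append, List.map_map, List.cons_append, List.map_nil]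
  refine congrArg (List.cons 0) ?_
  refine congrArg₂ List.cons (by omega) ?_
  refine congrArg₂ (· ++ ·) ?_ ?_
  · apply List.map_congr_left
    intro j _
    simp only [Function.comp]
    push_cast
    ring
  · have : (r ++ d).length = d.length + r.length := by simp [List.length_append]; omega
    rw [this]
    simp only [List.cons.injEq, and_true]
    push_cast
    ring

theorem edgesOf_uniform {c : Char} {r : List Char} (hU : Uni c r) :
    edgesOf r = [0, (r.length : Int)] := by
  unfold edgesOf natBounds
  rw [natBounds_uniform hU _ le_rfl]
  simp

theorem cast_mod_beq (k m : Nat) : (((k : Int) - 0) % (m : Int) == 0) = ((k % m) == 0) := by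
  have h : ((k : Int) - 0) % (m : Int) = ((k % m : Nat) : Int) := by
    rw [Int.sub_zero, Int.natCast_mod]
  rw [h]
  cases hb : (k % m) == 0
  · have hne : k % m ≠ 0 := by simpa using hb
    have hne' : ((k % m : Nat) : Int) ≠ 0 := by exact_mod_cast hne
    exact beq_eq_false_iff_ne.mpr hne'
  · have he : k % m = 0 := by simpa using hb
    simp [he]

theorem pairOK_head (c : Char) (ts : List Char) (k : Nat) :
    pairOK (c :: ts) (0, (k : Int)) =
      (if c = '2' then k % 2 == 0 else if c = '3' then k % 3 == 0
       else if c = '4' then k % 4 == 0 else true) := by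
  unfold pairOK
  simp only [PySem.List.pyGet?_zero_cons]
  by_cases h2 : c = '2'
  · subst h2
    rw [if_pos (by decide), if_pos rfl]
    have h : (('2'.toNat : Int) - 48) = 2 := by decide
    rw [h]
    exact cast_mod_beq k 2
  · by_cases h3 : c = '3'
    · subst h3
      rw [if_pos (by decide), if_neg h2, if_pos rfl]
      have h : (('3'.toNat : Int) - 48) = 3 := by decide
      rw [h]
      exact cast_mod_beq k 3
    · by_cases h4 : c = '4'
      · subst h4
        rw [if_pos (by decide), if_neg h2, if_neg h3, if_pos rfl]
        have h : (('4'.toNat : Int) - 48) = 4 := by decide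
        rw [h]
        exact cast_mod_beq k 4
      · rw [if_neg (by simp [h2, h3, h4]), if_neg h2, if_neg h3, if_neg h4]

theorem good_cons (c : Char) (ts : List Char) :
    good (c :: ts) =
      (if c = '2' then (ts.length + 1) % 2 == 0 else if c = '3' then (ts.length + 1) % 3 == 0
       else if c = '4' then (ts.length + 1) % 4 == 0 else true) := by
  unfold good
  simp only [List.head?_cons, Option.some.injEq, List.length_cons]

theorem edgesOf_nat (l : List Char) : ∀ a ∈ edgesOf l, ∃ m : Nat, a = (m : Int) := by
  intro a ha
  unfold edgesOf at ha
  rcases List.mem_cons.mp ha with h | h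
  · exact ⟨0, by simp [h]⟩
  · rcases List.mem_append.mp h with h | h
    · rcases List.mem_map.mp h with ⟨k, _, hk⟩
      exact ⟨1 + k, by rw [← hk]; push_cast; ring⟩
    · simp at h
      exact ⟨l.length, h⟩

theorem pairOK_shift (r d : List Char) (m : Nat) (b : Int) :
    pairOK (r ++ d) ((m : Int) + (r.length : Int), b + (r.length : Int)) =
      pairOK d ((m : Int), b) := by
  unfold pairOK
  have e1 : PySem.List.pyGet? (r ++ d) ((m : Int) + (r.length : Int)) =
      PySem.List.pyGet? d (m : Int) := by
    rw [show (m : Int) + (r.length : Int) = (r.length : Int) + (m : Int) by ring,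
      PySem.List.pyGet?_append_right, PySem.List.pyGet?_natCast]
  rw [e1]
  have e2 : b + (r.length : Int) - ((m : Int) + (r.length : Int)) = b - (m : Int) := by ring
  rw [e2]

theorem all_congr_mem {α : Type} (xs : List α) (p q : α → Bool)
    (h : ∀ x ∈ xs, p x = q x) : xs.all p = xs.all q := by
  induction xs with
  | nil => rfl
  | cons x xs ih =>
    simp only [List.all_cons, h x (by simp), ih (fun y hy => h y (by simp [hy]))]

theorem tail_map (f : Int → Int) (e : List Int) : (e.map f).tail = e.tail.map f := by
  cases e <;> simp

theorem shifted_all (l d : List Char) (k : Int)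
    (hsh : ∀ (m : Nat) (b : Int), pairOK l ((m : Int) + k, b + k) = pairOK d ((m : Int), b)) :
    (((edgesOf d).map (fun a => a + k)).zip (((edgesOf d).map (fun a => a + k)).tail)).all (pairOK l)
      = ((edgesOf d).zip (edgesOf d).tail).all (pairOK d) := by
  rw [tail_map, List.zip_map, List.all_map]
  apply all_congr_mem
  intro ab hab
  obtain ⟨a, b⟩ := ab
  obtain ⟨m, hm⟩ := edgesOf_nat d a (List.of_mem_zip hab).1
  subst hm
  simpa [Function.comp, Prod.map] using hsh m b

theorem pairsAll_cons_decomp (l : List Char) (w : Int) (ws : List Int)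
    (h : edgesOf l = 0 :: w :: ws) :
    pairsAll l = (pairOK l (0, w) && ((w :: ws).zip ws).all (pairOK l)) := by
  unfold pairsAll
  rw [h]
  simp [List.zip_cons_cons]

theorem pairsAll_nil : pairsAll ([] : List Char) = true := by
  have h : pairOK ([] : List Char) (0, 0) = true := by
    unfold pairOK
    rw [PySem.List.pyGet?_zero]
    simp
  unfold pairsAll edgesOf natBounds
  simp [h]

theorem head?_dropWhile_ne (c : Char) :
    ∀ (rest : List Char), ∀ x ∈ (rest.dropWhile (fun y => y == c)).head?, x ≠ c := by
  intro rest
  induction rest with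
  | nil => simp
  | cons a as ih =>
    by_cases hac : (a == c) = true
    · intro x hx
      rw [List.dropWhile_cons, if_pos hac] at hx
      exact ih x hx
    · intro x hx
      rw [List.dropWhile_cons, if_neg hac] at hx
      simp at hx
      subst hx
      simpa using hac

theorem pairsAll_step (c : Char) (t d : List Char) (hU : Uni c (c :: t))
    (hdh : ∀ x ∈ d.head?, x ≠ c)
    (hrec : pairsAll d = (runs d).all good) :
    pairsAll ((c :: t) ++ d) = (runs ((c :: t) ++ d)).all good := by
  have hruns : runs ((c :: t) ++ d) = (c :: t) :: runs d := runs_uniform hU d hdh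
  by_cases hne : d = []
  · subst hne
    rw [List.append_nil] at hruns ⊢
    unfold pairsAll
    rw [edgesOf_uniform hU, hruns]
    simp only [List.zip_cons_cons, List.tail_cons, List.zip_nil_right, List.all_cons,
      List.all_nil, Bool.and_true]
    rw [show ((c :: t).length : Int) = ((t.length + 1 : Nat) : Int) from rfl,
      pairOK_head, good_cons]
    simp [runs]
  · have hedge := edgesOf_run hU hdh hne
    have hedge2 : edgesOf ((c :: t) ++ d) =
        0 :: (0 + ((c :: t).length : Int)) ::
          ((natBounds d).map (fun (k : Nat) => 1 + (k : Int)) ++ [(d.length : Int)]).map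
            (fun a => a + ((c :: t).length : Int)) := by
      rw [hedge]
      rfl
    rw [pairsAll_cons_decomp _ _ _ hedge2]
    have hz : (((0 + ((c :: t).length : Int)) ::
          ((natBounds d).map (fun (k : Nat) => 1 + (k : Int)) ++ [(d.length : Int)]).map
            (fun a => a + ((c :: t).length : Int))).zip
          (((natBounds d).map (fun (k : Nat) => 1 + (k : Int)) ++ [(d.length : Int)]).map
            (fun a => a + ((c :: t).length : Int)))).all (pairOK ((c :: t) ++ d))
        = (((edgesOf d).map (fun a => a + ((c :: t).length : Int))).zip
            (((edgesOf d).map (fun a => a + ((c :: t).length : Int))).tail)).all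
            (pairOK ((c :: t) ++ d)) := by
      rw [show edgesOf d = 0 :: ((natBounds d).map (fun (k : Nat) => 1 + (k : Int))
        ++ [(d.length : Int)]) from rfl]
      simp only [List.map_cons, List.tail_cons]
    have hrec' : ((edgesOf d).zip (edgesOf d).tail).all (pairOK d) = (runs d).all good := hrec
    rw [hz, shifted_all ((c :: t) ++ d) d ((c :: t).length : Int)
        (fun m b => pairOK_shift (c :: t) d m b), hrec', hruns, List.all_cons]
    have hk0 : (0 : Int) + ((c :: t).length : Int) = ((t.length + 1 : Nat) : Int) := by
      push_cast
      simp
    have hh : pairOK ((c :: t) ++ d) (0, 0 + ((c :: t).length : Int)) = good (c :: t) := by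
      rw [hk0, List.cons_append, pairOK_head, good_cons]
    rw [hh]

theorem pairsAll_eq : ∀ n (l : List Char), l.length ≤ n → pairsAll l = (runs l).all good := by
  intro n
  induction n with
  | zero =>
    intro l h
    have h0 : l = [] := List.length_eq_zero_iff.mp (Nat.le_zero.mp h)
    subst h0
    rw [pairsAll_nil]
    simp [runs]
  | succ n ih =>
    intro l h
    cases l with
    | nil =>
      rw [pairsAll_nil]
      simp [runs]
    | cons c rest =>
      have hrd : rest = rest.takeWhile (fun y => y == c) ++ rest.dropWhile (fun y => y == c) :=
        (List.takeWhile_append_dropWhile).symm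
      have hU : Uni c (c :: rest.takeWhile (fun y => y == c)) := by
        refine ⟨by simp, fun x hx => ?_⟩
        rcases List.mem_cons.mp hx with h' | h'
        · exact h'
        · simpa using List.mem_takeWhile_imp h'
      have hlen : (rest.dropWhile (fun y => y == c)).length ≤ n := by
        have h1 := List.length_dropWhile_le (fun y => y == c) rest
        have h2 : rest.length ≤ n := by simpa using Nat.le_of_succ_le_succ h
        omega
      have hstep := pairsAll_step c (rest.takeWhile (fun y => y == c))
        (rest.dropWhile (fun y => y == c)) hU (head?_dropWhile_ne c rest)
        (ih _ hlen)
      rw [show c :: rest = (c :: rest.takeWhile (fun y => y == c)) ++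
          rest.dropWhile (fun y => y == c) by rw [List.cons_append, ← hrd]]
      exact hstep

theorem getLast?_uniform {c : Char} {temp : List Char} (hU : Uni c temp) :
    temp.getLast? = some c := by
  obtain ⟨hne, hall⟩ := hU
  rw [List.getLast?_eq_some_getLast (h := hne)]
  exact congrArg some (hall _ (List.getLast_mem hne))

-- main invariant for A's fold
theorem foldA_eq (l : List Char) : ∀ (bk : Bk) (c : Char) (temp : List Char), Uni c temp →
    (let st := l.foldl stepA (bk, temp); verdictA (flushA st.1 st.2)) =
      (verdictA bk && (runs (temp ++ l)).all good) := by
  induction l with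
  | nil =>
    intro bk c temp hU
    have h0 : runs ([] : List Char) = [] := by simp [runs]
    have hr : runs (temp ++ []) = [temp] := by
      rw [runs_uniform hU [] (by simp), h0]
    simp only [List.foldl_nil]
    rw [verdictA_flush, hr]
    simp
  | cons s l ih =>
    intro bk c temp hU
    simp only [List.foldl_cons, stepA, PySem.List.pyGet?_neg_one, getLast?_uniform hU]
    by_cases hsc : c = s
    · rw [if_pos (by rw [hsc])]
      have hU' : Uni c (temp ++ [s]) := by
        obtain ⟨hne, hall⟩ := hU
        refine ⟨by simp, fun x hx => ?_⟩
        rcases List.mem_append.mp hx with h | h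
        · exact hall x h
        · simp at h; rw [h, ← hsc]
      rw [ih bk c (temp ++ [s]) hU',
        show temp ++ [s] ++ l = temp ++ s :: l by simp]
    · rw [if_neg (by simpa using hsc)]
      have hrs := runs_uniform hU (s :: l) (by simpa using fun h => hsc h.symm)
      rw [ih (flushA bk temp) s [s] ⟨by simp, by simp⟩]
      rw [show temp ++ s :: l = temp ++ (s :: l) from rfl, hrs]
      simp [verdictA_flush, List.all_cons, Bool.and_assoc]

theorem check_eq_of_cons (string : String) (c : Char) (rest : List Char)
    (h : string.toList = c :: rest) : check string = check_alt string := by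
  unfold check
  have h0 : PySem.Str.pyGet? string 0 = some c := by
    simp [PySem.Str.pyGet?, h]
  have hsl : PySem.List.slice (c :: rest) (some 1) none = rest := by
    rw [PySem.List.slice_from (c :: rest) (by norm_num : (0:Int) ≤ 1)]; rfl
  have hA := foldA_eq rest ([], [], [], []) c [c] ⟨by simp, by simp⟩
  simp only at hA
  simp only [h0, h, hsl, hA]
  rw [check_alt_eq_pairsAll, h, pairsAll_eq (c :: rest).length _ le_rfl]
  simp [verdictA]

-- ===== VERDICT (by name: the statement is the Claim_ definition above) =====
theorem check_spec : Claim_equal_check := by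
  intro string _ hpre
  unfold Spec_check
  cases h : string.toList with
  | nil => exact absurd h hpre
  | cons c rest => exact check_eq_of_cons string c rest h
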